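-- pv_equiv track=rewrite | github.com/imsure/tech-interview-prep | py/leetcode_py/665.py | checkPossibility3
-- ===== SOURCE A (Python) =====
-- def checkPossibility3(nums):
--     """
--     For i in [0...n-2], compare nums[i] with nums[i+1], if nums[i] > nums[i+1],
--     we have two choices to make the array non-decreasing:
--     1) lower nums[i] to nums[i+1]
--     2) raise nums[i+1] to nums[i]
--
--     if each of the above action cannot make the array non-decreasing, then return False,
--     otherwise return True.
--
--     Time: O(n)
--     space: O(1)
--
--     :type nums: List[int]
--     :rtype: bool
--     """
--     for i in range(0, len(nums) - 1):
--         if nums[i] > nums[i+1]: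
--             tmp = nums[i]
--             nums[i] = nums[i+1]
--             if all(nums[i] <= nums[i+1] for i in range(len(nums)-1)):
--                 return True
--             nums[i] = tmp
--             nums[i+1] = nums[i]
--             if all(nums[i] <= nums[i+1] for i in range(len(nums)-1)):
--                 return True
--             return False
--
--     return True  # fall through here if len(nums) == 1
-- ===== SOURCE B (Python) =====
-- def checkPossibility3(nums):
--     n = len(nums)
--     bad = [i for i in range(n - 1) if nums[i] > nums[i + 1]]
--     if not bad:
--         return True
--     if len(bad) > 1:
--         return False
--     i = bad[0]
--     return (i == 0 or nums[i - 1] <= nums[i + 1]) or (i + 2 >= n or nums[i] <= nums[i + 2])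
-- ===== Notes on version B (the rewrite author's own statement) =====
-- stated objective: simpler
-- what changed: B collects the violation indices in one pass and decides by a local neighbour test at the unique violation, instead of A's try-a-fix-then-rescan-the-whole-array (twice) approach; B also does not mutate its argument.
import Mathlib
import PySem

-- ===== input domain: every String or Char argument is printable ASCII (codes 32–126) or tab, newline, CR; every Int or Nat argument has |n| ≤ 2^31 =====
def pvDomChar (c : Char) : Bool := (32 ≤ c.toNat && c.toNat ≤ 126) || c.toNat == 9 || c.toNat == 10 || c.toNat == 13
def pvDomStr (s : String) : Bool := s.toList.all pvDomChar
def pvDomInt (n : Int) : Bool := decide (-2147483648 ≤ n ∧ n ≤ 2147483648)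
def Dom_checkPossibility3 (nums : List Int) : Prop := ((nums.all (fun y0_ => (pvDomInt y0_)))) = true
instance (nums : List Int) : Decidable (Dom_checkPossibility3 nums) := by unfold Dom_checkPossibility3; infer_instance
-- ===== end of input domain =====

-- B replaces A's "try a fix, rescan the whole array (twice)" by one violation scan plus a local
-- neighbour test at the unique violation (objective: simpler). A mutates its argument in place;
-- B does not: the equivalence proved here is about the RETURN value only.

-- ===== PORT A =====
-- nums[i] for an in-range nonnegative index i (all of A's reads are in range)
def pvIdx (nums : List Int) (i : Nat) : Int := nums.getD i 0

-- the inner `all(nums[i] <= nums[i+1] for i in range(len(nums)-1))` rescan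
def pvASorted (nums : List Int) : Bool :=
  (List.range (nums.length - 1)).all (fun i => decide (pvIdx nums i ≤ pvIdx nums (i + 1)))

-- A's for-loop over i in range(0, len(nums)-1); at the first violation it performs the two
-- in-place fixes (nums[i] = nums[i+1]; restore; nums[i+1] = nums[i]) and rescans after each
def pvAGo (nums : List Int) : List Nat → Bool
  | [] => true
  | i :: rest =>
    if pvIdx nums i > pvIdx nums (i + 1) then
      if pvASorted (nums.set i (pvIdx nums (i + 1))) then true
      else if pvASorted (nums.set (i + 1) (pvIdx nums i)) then true
      else false
    else pvAGo nums rest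

def checkPossibility3 (nums : List Int) : Bool :=
  pvAGo nums (List.range (nums.length - 1))

-- ===== PORT B =====
def checkPossibility3_alt (nums : List Int) : Bool :=
  let n := nums.length
  let bad := (List.range (n - 1)).filter (fun i => decide (pvIdx nums i > pvIdx nums (i + 1)))
  match bad with
  | [] => true
  | [i] =>
      (decide (i = 0) || decide (pvIdx nums (i - 1) ≤ pvIdx nums (i + 1))) ||
      (decide (i + 2 ≥ n) || decide (pvIdx nums i ≤ pvIdx nums (i + 2)))
  | _ => false

-- ===== PRECONDITION & SPEC =====
def Spec_checkPossibility3 (nums : List Int) (out : Bool) : Prop := out = checkPossibility3_alt nums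
instance (nums : List Int) (out : Bool) : Decidable (Spec_checkPossibility3 nums out) := by unfold Spec_checkPossibility3; infer_instance

-- ===== CLAIM (what is proved, stated in full; the proofs are below) =====
def Claim_equal_checkPossibility3 : Prop := ∀ (nums : List Int), Dom_checkPossibility3 nums → Spec_checkPossibility3 nums (checkPossibility3 nums)

-- ===== LEMMAS AND PROOFS =====

-- reading a set-array
theorem pvIdx_set (l : List Int) (i k : Nat) (v : Int) :
    pvIdx (l.set i v) k = if i = k ∧ i < l.length then v else pvIdx l k := by
  simp [pvIdx, List.getD_eq_getElem?_getD, List.getElem?_set]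
  split_ifs <;> simp_all <;> omega

theorem pvASorted_iff (m : List Int) :
    pvASorted m = true ↔ ∀ k, k < m.length - 1 → pvIdx m k ≤ pvIdx m (k + 1) := by
  simp [pvASorted, List.mem_range]

-- A's loop returns the two-rescan check at the first violating index of its index list
theorem pvAGo_eq (nums : List Int) (l : List Nat) :
    pvAGo nums l =
      match l.filter (fun i => decide (pvIdx nums i > pvIdx nums (i + 1))) with
      | [] => true
      | i :: _ =>
          if pvASorted (nums.set i (pvIdx nums (i + 1))) then true
          else if pvASorted (nums.set (i + 1) (pvIdx nums i)) then true
          else false := by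
  induction l with
  | nil => rfl
  | cons a l ih =>
    by_cases h : pvIdx nums a > pvIdx nums (a + 1) <;>
      simp [pvAGo, h, ih]

-- head of a filtered range is the least element satisfying the predicate
theorem filter_range_head (n j : Nat) (rest : List Nat) (p : Nat → Bool)
    (h : (List.range n).filter p = j :: rest) :
    j < n ∧ p j = true ∧ ∀ k, k < j → p k = false := by
  have hmem : j ∈ (List.range n).filter p := h ▸ List.mem_cons_self ..
  have hj := List.mem_filter.1 hmem
  refine ⟨List.mem_range.1 hj.1, hj.2, ?_⟩
  intro k hk
  by_contra hpk
  have hpk' : p k = true := by revert hpk; cases p k <;> simp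
  have hkmem : k ∈ (List.range n).filter p :=
    List.mem_filter.2 ⟨List.mem_range.2 (Nat.lt_trans hk (List.mem_range.1 hj.1)), hpk'⟩
  -- the filtered range is pairwise <, so every later element exceeds j
  have hpw : ((List.range n).filter p).Pairwise (· < ·) :=
    List.Pairwise.filter _ List.pairwise_lt_range
  rw [h] at hkmem hpw
  rw [List.mem_cons] at hkmem
  rcases hkmem with rfl | hkr
  · omega
  · have := (List.pairwise_cons.1 hpw).1 k hkr
    omega

-- membership in a singleton filter forces equality
theorem filter_range_singleton (n j : Nat) (p : Nat → Bool)
    (h : (List.range n).filter p = [j]) :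
    ∀ k, k < n → p k = true → k = j := by
  intro k hk hpk
  have : k ∈ (List.range n).filter p := List.mem_filter.2 ⟨List.mem_range.2 hk, hpk⟩
  rw [h] at this; simpa using this

theorem checkPossibility3_eq_alt (nums : List Int) :
    checkPossibility3 nums = checkPossibility3_alt nums := by
  unfold checkPossibility3 checkPossibility3_alt
  rw [pvAGo_eq]
  set n := nums.length with hn
  set p : Nat → Bool := fun i => decide (pvIdx nums i > pvIdx nums (i + 1)) with hp
  rcases hbad : (List.range (n - 1)).filter p with _ | ⟨j, rest⟩
  · simp only [hbad]
  · obtain ⟨hjlt, hpj, hmin⟩ := filter_range_head _ _ _ _ hbad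
    have hviolj : pvIdx nums (j + 1) < pvIdx nums j := by
      simpa [hp] using hpj
    have hjlen : j < nums.length := by omega
    have hj1len : j + 1 < nums.length := by omega
    -- evaluate the first rescan: sorted iff no violation elsewhere and neighbour test at j-1
    have h1 : pvASorted (nums.set j (pvIdx nums (j + 1))) = true ↔
        ((∀ k, k < n - 1 → k ≠ j → k ≠ j - 1 → pvIdx nums k ≤ pvIdx nums (k + 1)) ∧
          (j = 0 ∨ pvIdx nums (j - 1) ≤ pvIdx nums (j + 1))) := by
      rw [pvASorted_iff]
      simp only [List.length_set]
      constructor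
      · intro h
        constructor
        · intro k hk hkj hkj1
          have := h k hk
          rwa [pvIdx_set, pvIdx_set, if_neg, if_neg] at this <;> omega
        · rcases Nat.eq_zero_or_pos j with h0 | h0
          · exact Or.inl h0
          · right
            have := h (j - 1) (by omega)
            rwa [pvIdx_set, pvIdx_set, if_neg (by omega),
              if_pos (by constructor <;> omega)] at this
      · rintro ⟨h, hnb⟩ k hk
        rw [pvIdx_set, pvIdx_set]
        by_cases hkj : k = j
        · subst hkj
          rw [if_pos ⟨rfl, hjlen⟩, if_neg (by omega)]
        · rw [if_neg (by omega)]
          by_cases hkj1 : k + 1 = j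
          · rw [if_pos ⟨hkj1.symm, hjlen⟩]
            rcases hnb with h0 | hle
            · omega
            · have : k = j - 1 := by omega
              subst this; exact hle
          · rw [if_neg (by omega)]
            exact h k hk hkj (by omega)
    -- evaluate the second rescan
    have h2 : pvASorted (nums.set (j + 1) (pvIdx nums j)) = true ↔
        ((∀ k, k < n - 1 → k ≠ j → k ≠ j + 1 → pvIdx nums k ≤ pvIdx nums (k + 1)) ∧
          (j + 2 ≥ n ∨ pvIdx nums j ≤ pvIdx nums (j + 2))) := by
      rw [pvASorted_iff]
      simp only [List.length_set]
      constructor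
      · intro h
        constructor
        · intro k hk hkj hkj1
          have := h k hk
          rwa [pvIdx_set, pvIdx_set, if_neg, if_neg] at this <;> omega
        · by_cases hend : j + 2 ≥ n
          · exact Or.inl hend
          · right
            have := h (j + 1) (by omega)
            rwa [pvIdx_set, pvIdx_set, if_pos ⟨rfl, hj1len⟩, if_neg (by omega)] at this
      · rintro ⟨h, hnb⟩ k hk
        rw [pvIdx_set, pvIdx_set]
        by_cases hkj : k = j
        · subst hkj
          rw [if_neg (by omega), if_pos ⟨rfl, hj1len⟩]
        · by_cases hkj1 : k = j + 1
          · subst hkj1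
            rw [if_pos ⟨rfl, hj1len⟩, if_neg (by omega)]
            rcases hnb with h0 | hle
            · omega
            · exact hle
          · rw [if_neg (by omega), if_neg (by omega)]
            exact h k hk hkj hkj1
    rcases hrest : rest with _ | ⟨j', rest'⟩
    · -- exactly one violation: both sides reduce to the local neighbour test
      subst hrest
      simp only [hbad]
      have huniq : ∀ k, k < n - 1 → k ≠ j → pvIdx nums k ≤ pvIdx nums (k + 1) := by
        intro k hk hkj
        by_contra hlt
        exact hkj (filter_range_singleton _ _ _ hbad k hk (by simp [hp]; omega))
      by_cases hc1 : j = 0 ∨ pvIdx nums (j - 1) ≤ pvIdx nums (j + 1)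
      · have hs1 : pvASorted (nums.set j (pvIdx nums (j + 1))) = true :=
          h1.2 ⟨fun k hk hkj _ => huniq k hk hkj, hc1⟩
        rw [if_pos hs1]
        symm
        simp only [Bool.or_eq_true, decide_eq_true_eq]
        tauto
      · have hs1 : pvASorted (nums.set j (pvIdx nums (j + 1))) = false := by
          rw [Bool.eq_false_iff]; intro hT; exact hc1 (h1.1 hT).2
        rw [if_neg (by simp [hs1])]
        by_cases hc2 : j + 2 ≥ n ∨ pvIdx nums j ≤ pvIdx nums (j + 2)
        · have hs2 : pvASorted (nums.set (j + 1) (pvIdx nums j)) = true :=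
            h2.2 ⟨fun k hk hkj _ => huniq k hk hkj, hc2⟩
          rw [if_pos hs2]
          symm
          simp only [Bool.or_eq_true, decide_eq_true_eq]
          tauto
        · have hs2 : pvASorted (nums.set (j + 1) (pvIdx nums j)) = false := by
            rw [Bool.eq_false_iff]; intro hT; exact hc2 (h2.1 hT).2
          rw [if_neg (by simp [hs2])]
          symm
          simp only [Bool.or_eq_false_iff, decide_eq_false_iff_not]
          tauto
    · -- a second violation j' exists; both rescans fail, and B returns false
      subst hrest
      simp only [hbad]
      have hj'mem : j' ∈ (List.range (n - 1)).filter p := by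
        rw [hbad]; simp
      have hj' := List.mem_filter.1 hj'mem
      have hj'lt : j' < n - 1 := List.mem_range.1 hj'.1
      have hviolj' : pvIdx nums (j' + 1) < pvIdx nums j' := by
        simpa [hp] using hj'.2
      have hjj' : j < j' := by
        have hpw : ((List.range (n - 1)).filter p).Pairwise (· < ·) :=
          List.Pairwise.filter _ List.pairwise_lt_range
        rw [hbad] at hpw
        exact (List.pairwise_cons.1 hpw).1 j' (by simp)
      have hs1 : pvASorted (nums.set j (pvIdx nums (j + 1))) = false := by
        rw [Bool.eq_false_iff]; intro hT
        have := (h1.1 hT).1 j' hj'lt (by omega) (by omega)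
        omega
      have hs2 : pvASorted (nums.set (j + 1) (pvIdx nums j)) = false := by
        rw [Bool.eq_false_iff]; intro hT
        by_cases hj'j1 : j' = j + 1
        · -- the second fix raises nums[j+1] to nums[j]; the violation at j+1 only worsens
          have hle := (pvASorted_iff _).1 hT (j + 1) (by simp; omega)
          rw [pvIdx_set, pvIdx_set, if_pos ⟨rfl, hj1len⟩, if_neg (by omega)] at hle
          subst hj'j1
          omega
        · have := (h2.1 hT).1 j' hj'lt (by omega) hj'j1
          omega
      rw [if_neg (by simp [hs1]), if_neg (by simp [hs2])]

-- ===== VERDICT (by name: the statement is the Claim_ definition above) =====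
theorem checkPossibility3_spec : Claim_equal_checkPossibility3 := by
  intro nums _
  unfold Spec_checkPossibility3
  exact checkPossibility3_eq_alt nums
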